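-- pv_equiv track=rewrite | github.com/encode/django-rest-framework | rest_framework/utils/dates.py | get_readable_date_format
-- ===== SOURCE A (Python) =====
-- def get_readable_date_format(date_format):
--     mapping = [("%Y", "YYYY"),
--                ("%y", "YY"),
--                ("%m", "MM"),
--                ("%b", "[Jan through Dec]"),
--                ("%B", "[January through December]"),
--                ("%d", "DD"),
--                ("%H", "HH"),
--                ("%M", "MM"),
--                ("%S", "SS"),
--                ("%f", "uuuuuu")]
--     for k, v in mapping:
--         date_format = date_format.replace(k, v)
--     return date_format
-- ===== SOURCE B (Python) =====
-- MAPPING = {"%Y": "YYYY",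
--            "%y": "YY",
--            "%m": "MM",
--            "%b": "[Jan through Dec]",
--            "%B": "[January through December]",
--            "%d": "DD",
--            "%H": "HH",
--            "%M": "MM",
--            "%S": "SS",
--            "%f": "uuuuuu"}
--
--
-- def get_readable_date_format(date_format):
--     out = []
--     i = 0
--     n = len(date_format)
--     while i < n:
--         pair = date_format[i:i + 2]
--         if pair in MAPPING:
--             out.append(MAPPING[pair])
--             i += 2
--         else:
--             out.append(date_format[i])
--             i += 1
--     return "".join(out)
-- ===== Notes on version B (the rewrite author's own statement) =====
-- stated objective: alternative
-- what changed: Replaced A's ten sequential full-string replace passes (one per strftime code) by a single left-to-right scan that looks each two-character slice up in a code-to-label dictionary and emits the label or the character.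
-- intended difference: On inputs containing the substring "%%m" A's passes cascade (the %m pass leaves '%MM' and the later %M pass consumes the leftover percent, so A('%%m')='MMM') while B's single scan keeps the literal percent and returns '%MM'; B's value is intended because a doubled percent is strftime's escape for a literal percent sign. — e.g. on get_readable_date_format("%%m"): A returns "MMM", B returns "%MM"
import Mathlib
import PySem

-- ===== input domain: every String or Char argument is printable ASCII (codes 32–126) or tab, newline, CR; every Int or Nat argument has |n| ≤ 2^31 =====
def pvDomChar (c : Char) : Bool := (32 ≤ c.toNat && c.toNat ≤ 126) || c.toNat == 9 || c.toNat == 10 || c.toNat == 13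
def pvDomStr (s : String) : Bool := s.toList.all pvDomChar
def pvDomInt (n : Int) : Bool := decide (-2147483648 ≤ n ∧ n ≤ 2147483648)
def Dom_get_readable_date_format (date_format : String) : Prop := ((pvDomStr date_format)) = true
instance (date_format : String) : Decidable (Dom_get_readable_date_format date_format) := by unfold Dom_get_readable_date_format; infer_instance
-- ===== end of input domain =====

-- B replaces A's ten sequential full-string replace passes by ONE left-to-right scan with a
-- code→label dictionary (alternative decomposition, similar cost); on inputs containing "%%m"
-- A's cascading passes differ from the single scan (see D_ below).

set_option maxRecDepth 8192


-- ===== PORT A =====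
-- A's `mapping` list of (strftime code, readable label) pairs
def pvMappingA : List (String × String) :=
  [("%Y", "YYYY"),
   ("%y", "YY"),
   ("%m", "MM"),
   ("%b", "[Jan through Dec]"),
   ("%B", "[January through December]"),
   ("%d", "DD"),
   ("%H", "HH"),
   ("%M", "MM"),
   ("%S", "SS"),
   ("%f", "uuuuuu")]

-- A: `for k, v in mapping: date_format = date_format.replace(k, v)` as a fold over the list
def get_readable_date_format (date_format : String) : String :=
  pvMappingA.foldl (fun acc kv => PySem.Str.replace acc kv.1 kv.2) date_format

-- ===== PORT B =====
-- B's MAPPING dict (insertion order as in Source B)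
def pvMappingB : PySem.Dict String String :=
  PySem.Dict.ofList
    [("%Y", "YYYY"),
     ("%y", "YY"),
     ("%m", "MM"),
     ("%b", "[Jan through Dec]"),
     ("%B", "[January through December]"),
     ("%d", "DD"),
     ("%H", "HH"),
     ("%M", "MM"),
     ("%S", "SS"),
     ("%f", "uuuuuu")]

-- B's while loop over indices, as structural recursion over the character list:
-- the two-character slice date_format[i:i+2] is [a, b]; a one-character tail slice is [c],
-- which is never a key of MAPPING, hence the `[c] => [c]` case.
def pvScanB : List Char → List Char
  | [] => []
  | [c] => [c]
  | a :: b :: t =>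
    match PySem.Dict.get? pvMappingB (String.ofList [a, b]) with
    | some v => v.toList ++ pvScanB t
    | none => a :: pvScanB (b :: t)

def get_readable_date_format_alt (date_format : String) : String :=
  String.ofList (pvScanB date_format.toList)

-- ===== PRECONDITION & SPEC =====
-- On inputs containing "%%m", A's pass for "%m" rewrites it to "%MM" and the later pass for
-- "%M" then consumes the leftover "%" giving e.g. "MMM", while B's single scan keeps the
-- literal "%" and returns "%MM"; B's value is intended since "%%" is strftime's literal percent.
def D_get_readable_date_format (date_format : String) : Prop :=
  PySem.Str.isIn "%%m" date_format = true
instance (date_format : String) : Decidable (D_get_readable_date_format date_format) := by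
  unfold D_get_readable_date_format; infer_instance

def Spec_get_readable_date_format (date_format : String) (out : String) : Prop :=
  ¬ D_get_readable_date_format date_format → out = get_readable_date_format_alt date_format
instance (date_format : String) (out : String) : Decidable (Spec_get_readable_date_format date_format out) := by
  unfold Spec_get_readable_date_format; infer_instance

def pvDiffWitness_get_readable_date_format : String := "%%m"
def pvDiffWitnessOut_get_readable_date_format : String × String := ("MMM", "%MM")

-- ===== CLAIM (what is proved, stated in full; the proofs are below) =====
def Claim_unchanged_get_readable_date_format : Prop := ∀ (date_format : String), Dom_get_readable_date_format date_format → Spec_get_readable_date_format date_format (get_readable_date_format date_format)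
def Claim_changed_get_readable_date_format : Prop := Dom_get_readable_date_format (pvDiffWitness_get_readable_date_format) ∧ D_get_readable_date_format (pvDiffWitness_get_readable_date_format) ∧ get_readable_date_format (pvDiffWitness_get_readable_date_format) = pvDiffWitnessOut_get_readable_date_format.1 ∧ get_readable_date_format_alt (pvDiffWitness_get_readable_date_format) = pvDiffWitnessOut_get_readable_date_format.2 ∧ pvDiffWitnessOut_get_readable_date_format.1 ≠ pvDiffWitnessOut_get_readable_date_format.2
def Claim_exact_get_readable_date_format : Prop := ∀ (date_format : String), Dom_get_readable_date_format date_format → D_get_readable_date_format date_format → get_readable_date_format date_format ≠ get_readable_date_format_alt date_format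

-- ===== LEMMAS AND PROOFS =====

-- Clean recursive form of Python's str.replace for a two-character pattern ['%', q]
def pvRep (q : Char) (v : List Char) : List Char → List Char
  | [] => []
  | [c] => [c]
  | a :: b :: t =>
    if a = '%' ∧ b = q then v ++ pvRep q v t
    else a :: pvRep q v (b :: t)

theorem pvGo_eq (q : Char) (v : List Char) :
    ∀ fuel l acc, l.length ≤ fuel →
      PySem.Chars.replace.go ['%', q] v fuel l acc = acc.reverse ++ pvRep q v l := by
  intro fuel
  induction fuel with
  | zero =>
    intro l acc h
    have : l = [] := List.eq_nil_of_length_eq_zero (Nat.le_zero.mp h)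
    subst this
    simp [PySem.Chars.replace.go, pvRep]
  | succ n ih =>
    intro l acc h
    match l with
    | [] => simp [PySem.Chars.replace.go, pvRep]
    | [c] =>
      rw [PySem.Chars.replace.go]
      simp [pvRep, ih [] (c :: acc) (by simp)]
    | a :: b :: t =>
      rw [PySem.Chars.replace.go]
      by_cases hab : a = '%' ∧ b = q
      · have hpre : (['%', q].isPrefixOf (a :: b :: t)) = true := by
          simp [List.isPrefixOf, hab.1, hab.2]
        simp only [hpre, if_pos, List.length_cons, List.drop_succ_cons]
        simp only [List.length_nil, List.drop_zero]
        rw [ih t (v.reverse ++ acc) (by simp at h ⊢; omega)]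
        simp [pvRep, hab]
      · have hpre : (['%', q].isPrefixOf (a :: b :: t)) = false := by
          simp [List.isPrefixOf]
          intro h1 h2
          exact hab ⟨h1.symm, h2.symm⟩
        simp only [hpre, Bool.false_eq_true, if_false]
        rw [ih (b :: t) (a :: acc) (by simp at h ⊢; omega)]
        simp [pvRep, hab]

theorem pvReplace_eq_rep (q : Char) (v : List Char) (l : List Char) :
    PySem.Chars.replace l ['%', q] v = pvRep q v l := by
  rw [PySem.Chars.replace]
  simp [pvGo_eq q v l.length l [] (le_refl _)]

-- The ten readable labels, as character lists
def pvVY : List Char := ['Y','Y','Y','Y']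
def pvVy : List Char := ['Y','Y']
def pvVm : List Char := ['M','M']
def pvVb : List Char := ['[','J','a','n',' ','t','h','r','o','u','g','h',' ','D','e','c',']']
def pvVB : List Char := ['[','J','a','n','u','a','r','y',' ','t','h','r','o','u','g','h',' ','D','e','c','e','m','b','e','r',']']
def pvVd : List Char := ['D','D']
def pvVH : List Char := ['H','H']
def pvVM : List Char := ['M','M']
def pvVS : List Char := ['S','S']
def pvVf : List Char := ['u','u','u','u','u','u']

-- A's whole chain of ten replaces, on character lists
def pvRepAll (l : List Char) : List Char :=
  pvRep 'f' pvVf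
    (pvRep 'S' pvVS
      (pvRep 'M' pvVM
        (pvRep 'H' pvVH
          (pvRep 'd' pvVd
            (pvRep 'B' pvVB
              (pvRep 'b' pvVb
                (pvRep 'm' pvVm
                  (pvRep 'y' pvVy
                    (pvRep 'Y' pvVY l)))))))))

theorem pvA_eq_repAll (s : String) :
    get_readable_date_format s = String.ofList (pvRepAll s.toList) := by
  have e1 : ("%Y":String).toList = ['%','Y'] := by decide
  have e2 : ("%y":String).toList = ['%','y'] := by decide
  have e3 : ("%m":String).toList = ['%','m'] := by decide
  have e4 : ("%b":String).toList = ['%','b'] := by decide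
  have e5 : ("%B":String).toList = ['%','B'] := by decide
  have e6 : ("%d":String).toList = ['%','d'] := by decide
  have e7 : ("%H":String).toList = ['%','H'] := by decide
  have e8 : ("%M":String).toList = ['%','M'] := by decide
  have e9 : ("%S":String).toList = ['%','S'] := by decide
  have e10 : ("%f":String).toList = ['%','f'] := by decide
  have f1 : ("YYYY":String).toList = pvVY := by decide
  have f2 : ("YY":String).toList = pvVy := by decide
  have f3 : ("MM":String).toList = pvVm := by decide
  have f4 : ("[Jan through Dec]":String).toList = pvVb := by decide
  have f5 : ("[January through December]":String).toList = pvVB := by decide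
  have f6 : ("DD":String).toList = pvVd := by decide
  have f7 : ("HH":String).toList = pvVH := by decide
  have f8 : ("SS":String).toList = pvVS := by decide
  have f9 : ("uuuuuu":String).toList = pvVf := by decide
  simp only [get_readable_date_format, pvMappingA, List.foldl, PySem.Str.replace,
    String.toList_ofList, e1, e2, e3, e4, e5, e6, e7, e8, e9, e10,
    f1, f2, f3, f4, f5, f6, f7, f8, f9,
    pvReplace_eq_rep, pvRepAll, pvVm, pvVM]

theorem pvB_eq_scan (s : String) :
    get_readable_date_format_alt s = String.ofList (pvScanB s.toList) := rfl


theorem pvRep_nil (q : Char) (v : List Char) : pvRep q v [] = [] := rfl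

theorem pvRep_cons (q : Char) (v : List Char) (a : Char) (X : List Char) (ha : a ≠ '%') :
    pvRep q v (a :: X) = a :: pvRep q v X := by
  cases X with
  | nil => rfl
  | cons b t => simp [pvRep, ha]

theorem pvRep_pct (q : Char) (v : List Char) (X : List Char) (hX : X.head? ≠ some q) :
    pvRep q v ('%' :: X) = '%' :: pvRep q v X := by
  cases X with
  | nil => rfl
  | cons b t =>
    simp only [List.head?_cons, ne_eq, Option.some.injEq] at hX
    simp [pvRep, hX]

theorem pvRep_match (q : Char) (v : List Char) (X : List Char) :
    pvRep q v ('%' :: q :: X) = v ++ pvRep q v X := by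
  simp [pvRep]

theorem pvRep_block (q : Char) (v : List Char) (w : List Char) (X : List Char)
    (hw : ∀ a ∈ w, a ≠ '%') :
    pvRep q v (w ++ X) = w ++ pvRep q v X := by
  induction w with
  | nil => simp
  | cons a w ih =>
    have ha : a ≠ '%' := hw a (by simp)
    simp only [List.cons_append]
    rw [pvRep_cons q v a _ ha, ih (fun b hb => hw b (by simp [hb]))]

theorem pvHead_run (K : Nat) (X : List Char) :
    (List.replicate K '%' ++ '%' :: X).head? = some '%' := by
  cases K with
  | zero => simp
  | succ n => simp [List.replicate_succ]

theorem pvRep_runPct (q : Char) (v : List Char) (K : Nat) (X : List Char)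
    (hq : q ≠ '%') (hX : X.head? ≠ some q) :
    pvRep q v (List.replicate K '%' ++ '%' :: X) =
      List.replicate K '%' ++ '%' :: pvRep q v X := by
  induction K with
  | zero => simpa using pvRep_pct q v X hX
  | succ n ih =>
    simp only [List.replicate_succ, List.cons_append]
    rw [pvRep_pct q v _ (by rw [pvHead_run]; intro h; exact hq (Option.some.inj h).symm), ih]

theorem pvRep_runMatch (q : Char) (v : List Char) (K : Nat) (X : List Char) (hq : q ≠ '%') :
    pvRep q v (List.replicate K '%' ++ '%' :: q :: X) =
      List.replicate K '%' ++ (v ++ pvRep q v X) := by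
  induction K with
  | zero => simpa using pvRep_match q v X
  | succ n ih =>
    simp only [List.replicate_succ, List.cons_append]
    rw [pvRep_pct q v _ (by rw [pvHead_run]; intro h; exact hq (Option.some.inj h).symm), ih]

theorem pvRep_runBlock (q : Char) (v : List Char) (K : Nat) (w : List Char) (X : List Char)
    (hq : q ≠ '%') (hne : w ≠ []) (hw : ∀ a ∈ w, a ≠ '%') (hhd : w.head? ≠ some q) :
    pvRep q v (List.replicate K '%' ++ (w ++ X)) =
      List.replicate K '%' ++ (w ++ pvRep q v X) := by
  induction K with
  | zero => simpa using pvRep_block q v w X hw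
  | succ n ih =>
    have hhd2 : (List.replicate n '%' ++ (w ++ X)).head? ≠ some q := by
      cases n with
      | zero =>
        cases w with
        | nil => exact absurd rfl hne
        | cons a w' => simpa using hhd
      | succ m =>
        simp only [List.replicate_succ, List.cons_append, List.head?_cons, ne_eq,
          Option.some.injEq]
        intro h; exact hq h.symm
    simp only [List.replicate_succ, List.cons_append]
    rw [pvRep_pct q v _ hhd2, ih]

theorem pvScanB_pp (X : List Char) : pvScanB ('%' :: '%' :: X) = '%' :: pvScanB ('%' :: X) := by
  have : PySem.Dict.get? pvMappingB (String.ofList ['%', '%']) = none := by decide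
  simp [pvScanB, this]

theorem pvLk_none (a b : Char) (ha : a ≠ '%') :
    PySem.Dict.get? pvMappingB (String.ofList [a, b]) = none := by
  rw [PySem.Dict.get?_eq_none_iff_not_mem_keys]
  rw [show pvMappingB.keys = ["%Y","%y","%m","%b","%B","%d","%H","%M","%S","%f"] from by decide]
  intro hmem
  simp only [List.mem_cons, List.not_mem_nil, or_false] at hmem
  rcases hmem with h|h|h|h|h|h|h|h|h|h <;>
    exact ha (by have := congrArg String.toList h; simp [String.toList_ofList] at this; exact this.1)

theorem pvLk_noncode (b : Char) (hb : b ∉ ['Y','y','m','b','B','d','H','M','S','f']) :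
    PySem.Dict.get? pvMappingB (String.ofList ['%', b]) = none := by
  rw [PySem.Dict.get?_eq_none_iff_not_mem_keys]
  rw [show pvMappingB.keys = ["%Y","%y","%m","%b","%B","%d","%H","%M","%S","%f"] from by decide]
  intro hmem
  simp only [List.mem_cons, List.not_mem_nil, or_false] at hmem
  rcases hmem with h|h|h|h|h|h|h|h|h|h <;>
    (have hx := congrArg String.toList h; simp [String.toList_ofList] at hx; subst hx;
     exact hb (by decide))

theorem pvScanB_cons (a : Char) (X : List Char) (ha : a ≠ '%') :
    pvScanB (a :: X) = a :: pvScanB X := by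
  cases X with
  | nil => rfl
  | cons b t => simp [pvScanB, pvLk_none a b ha]

theorem pvScanB_run (K : Nat) (X : List Char) :
    pvScanB (List.replicate K '%' ++ '%' :: X) =
      List.replicate K '%' ++ pvScanB ('%' :: X) := by
  induction K with
  | zero => simp
  | succ n ih =>
    simp only [List.replicate_succ, List.cons_append]
    cases n with
    | zero => simpa using pvScanB_pp X
    | succ m =>
      rw [show ('%' :: (List.replicate (m + 1) '%' ++ '%' :: X)) =
            ('%' :: '%' :: (List.replicate m '%' ++ '%' :: X)) by simp [List.replicate_succ],
          pvScanB_pp]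
      rw [show ('%' :: (List.replicate m '%' ++ '%' :: X)) =
            (List.replicate (m + 1) '%' ++ '%' :: X) by simp [List.replicate_succ]]
      rw [ih]


theorem pvRep_pctcons (q : Char) (v : List Char) (b : Char) (X : List Char)
    (hb : b ≠ q) (hb2 : b ≠ '%') :
    pvRep q v ('%' :: b :: X) = '%' :: b :: pvRep q v X := by
  rw [pvRep_pct q v _ (by simp [hb]), pvRep_cons q v b X hb2]

theorem pvShift (k : Nat) (X : List Char) :
    List.replicate k '%' ++ '%' :: X = '%' :: (List.replicate k '%' ++ X) := by
  induction k with
  | zero => simp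
  | succ n ih => simp only [List.replicate_succ, List.cons_append, ih]

theorem pvDecomp (l : List Char) :
    ∃ k rest, l = List.replicate k '%' ++ rest ∧ rest.head? ≠ some '%' := by
  induction l with
  | nil => exact ⟨0, [], by simp, by simp⟩
  | cons c t ih =>
    by_cases hc : c = '%'
    · obtain ⟨k, rest, ht, hr⟩ := ih
      exact ⟨k + 1, rest, by simp [List.replicate_succ, hc, ht], hr⟩
    · exact ⟨0, c :: t, by simp, by simp [hc]⟩

theorem pvInfMono {p l t : List Char} (h : t <:+ l) (hn : ¬ p <:+: l) : ¬ p <:+: t :=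
  fun hi => hn (hi.trans h.isInfix)


theorem pvRAll_cons (c : Char) (t : List Char) (hc : c ≠ '%') :
    pvRepAll (c :: t) = c :: pvRepAll t := by
  simp only [pvRepAll]
  rw [pvRep_cons 'Y' pvVY c _ hc]
  rw [pvRep_cons 'y' pvVy c _ hc]
  rw [pvRep_cons 'm' pvVm c _ hc]
  rw [pvRep_cons 'b' pvVb c _ hc]
  rw [pvRep_cons 'B' pvVB c _ hc]
  rw [pvRep_cons 'd' pvVd c _ hc]
  rw [pvRep_cons 'H' pvVH c _ hc]
  rw [pvRep_cons 'M' pvVM c _ hc]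
  rw [pvRep_cons 'S' pvVS c _ hc]
  rw [pvRep_cons 'f' pvVf c _ hc]


theorem pvRAll_run_pure (k : Nat) :
    pvRepAll (List.replicate k '%' ++ '%' :: ([] : List Char)) = List.replicate k '%' ++ ['%'] := by
  simp only [pvRepAll]
  rw [pvRep_runPct 'Y' pvVY k [] (by decide) (by simp), pvRep_nil]
  rw [pvRep_runPct 'y' pvVy k [] (by decide) (by simp), pvRep_nil]
  rw [pvRep_runPct 'm' pvVm k [] (by decide) (by simp), pvRep_nil]
  rw [pvRep_runPct 'b' pvVb k [] (by decide) (by simp), pvRep_nil]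
  rw [pvRep_runPct 'B' pvVB k [] (by decide) (by simp), pvRep_nil]
  rw [pvRep_runPct 'd' pvVd k [] (by decide) (by simp), pvRep_nil]
  rw [pvRep_runPct 'H' pvVH k [] (by decide) (by simp), pvRep_nil]
  rw [pvRep_runPct 'M' pvVM k [] (by decide) (by simp), pvRep_nil]
  rw [pvRep_runPct 'S' pvVS k [] (by decide) (by simp), pvRep_nil]
  rw [pvRep_runPct 'f' pvVf k [] (by decide) (by simp), pvRep_nil]

theorem pvRA_m (t : List Char) : pvRepAll ('%' :: 'm' :: t) = pvVm ++ pvRepAll t := by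
  simp only [pvRepAll]
  rw [pvRep_pctcons 'Y' pvVY 'm' _ (by decide) (by decide)]
  rw [pvRep_pctcons 'y' pvVy 'm' _ (by decide) (by decide)]
  rw [pvRep_match 'm' pvVm]
  rw [pvRep_block 'b' pvVb pvVm _ (by simp [pvVm])]
  rw [pvRep_block 'B' pvVB pvVm _ (by simp [pvVm])]
  rw [pvRep_block 'd' pvVd pvVm _ (by simp [pvVm])]
  rw [pvRep_block 'H' pvVH pvVm _ (by simp [pvVm])]
  rw [pvRep_block 'M' pvVM pvVm _ (by simp [pvVm])]
  rw [pvRep_block 'S' pvVS pvVm _ (by simp [pvVm])]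
  rw [pvRep_block 'f' pvVf pvVm _ (by simp [pvVm])]


theorem pvRARun_Yu (K : Nat) (t : List Char) :
    pvRepAll (List.replicate K '%' ++ '%' :: 'Y' :: t) =
      List.replicate K '%' ++ (pvVY ++ pvRepAll t) := by
  simp only [pvRepAll]
  rw [pvRep_runMatch 'Y' pvVY K _ (by decide)]
  rw [pvRep_runBlock 'y' pvVy K pvVY _ (by decide) (by simp [pvVY]) (by simp [pvVY]) (by simp [pvVY])]
  rw [pvRep_runBlock 'm' pvVm K pvVY _ (by decide) (by simp [pvVY]) (by simp [pvVY]) (by simp [pvVY])]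
  rw [pvRep_runBlock 'b' pvVb K pvVY _ (by decide) (by simp [pvVY]) (by simp [pvVY]) (by simp [pvVY])]
  rw [pvRep_runBlock 'B' pvVB K pvVY _ (by decide) (by simp [pvVY]) (by simp [pvVY]) (by simp [pvVY])]
  rw [pvRep_runBlock 'd' pvVd K pvVY _ (by decide) (by simp [pvVY]) (by simp [pvVY]) (by simp [pvVY])]
  rw [pvRep_runBlock 'H' pvVH K pvVY _ (by decide) (by simp [pvVY]) (by simp [pvVY]) (by simp [pvVY])]
  rw [pvRep_runBlock 'M' pvVM K pvVY _ (by decide) (by simp [pvVY]) (by simp [pvVY]) (by simp [pvVY])]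
  rw [pvRep_runBlock 'S' pvVS K pvVY _ (by decide) (by simp [pvVY]) (by simp [pvVY]) (by simp [pvVY])]
  rw [pvRep_runBlock 'f' pvVf K pvVY _ (by decide) (by simp [pvVY]) (by simp [pvVY]) (by simp [pvVY])]


theorem pvRARun_y (K : Nat) (t : List Char) :
    pvRepAll (List.replicate K '%' ++ '%' :: 'y' :: t) =
      List.replicate K '%' ++ (pvVy ++ pvRepAll t) := by
  simp only [pvRepAll]
  rw [pvRep_runPct 'Y' pvVY K _ (by decide) (by simp), pvRep_cons 'Y' pvVY 'y' _ (by decide)]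
  rw [pvRep_runMatch 'y' pvVy K _ (by decide)]
  rw [pvRep_runBlock 'm' pvVm K pvVy _ (by decide) (by simp [pvVy]) (by simp [pvVy]) (by simp [pvVy])]
  rw [pvRep_runBlock 'b' pvVb K pvVy _ (by decide) (by simp [pvVy]) (by simp [pvVy]) (by simp [pvVy])]
  rw [pvRep_runBlock 'B' pvVB K pvVy _ (by decide) (by simp [pvVy]) (by simp [pvVy]) (by simp [pvVy])]
  rw [pvRep_runBlock 'd' pvVd K pvVy _ (by decide) (by simp [pvVy]) (by simp [pvVy]) (by simp [pvVy])]
  rw [pvRep_runBlock 'H' pvVH K pvVy _ (by decide) (by simp [pvVy]) (by simp [pvVy]) (by simp [pvVy])]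
  rw [pvRep_runBlock 'M' pvVM K pvVy _ (by decide) (by simp [pvVy]) (by simp [pvVy]) (by simp [pvVy])]
  rw [pvRep_runBlock 'S' pvVS K pvVy _ (by decide) (by simp [pvVy]) (by simp [pvVy]) (by simp [pvVy])]
  rw [pvRep_runBlock 'f' pvVf K pvVy _ (by decide) (by simp [pvVy]) (by simp [pvVy]) (by simp [pvVy])]


theorem pvRARun_b (K : Nat) (t : List Char) :
    pvRepAll (List.replicate K '%' ++ '%' :: 'b' :: t) =
      List.replicate K '%' ++ (pvVb ++ pvRepAll t) := by
  simp only [pvRepAll]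
  rw [pvRep_runPct 'Y' pvVY K _ (by decide) (by simp), pvRep_cons 'Y' pvVY 'b' _ (by decide)]
  rw [pvRep_runPct 'y' pvVy K _ (by decide) (by simp), pvRep_cons 'y' pvVy 'b' _ (by decide)]
  rw [pvRep_runPct 'm' pvVm K _ (by decide) (by simp), pvRep_cons 'm' pvVm 'b' _ (by decide)]
  rw [pvRep_runMatch 'b' pvVb K _ (by decide)]
  rw [pvRep_runBlock 'B' pvVB K pvVb _ (by decide) (by simp [pvVb]) (by simp [pvVb]) (by simp [pvVb])]
  rw [pvRep_runBlock 'd' pvVd K pvVb _ (by decide) (by simp [pvVb]) (by simp [pvVb]) (by simp [pvVb])]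
  rw [pvRep_runBlock 'H' pvVH K pvVb _ (by decide) (by simp [pvVb]) (by simp [pvVb]) (by simp [pvVb])]
  rw [pvRep_runBlock 'M' pvVM K pvVb _ (by decide) (by simp [pvVb]) (by simp [pvVb]) (by simp [pvVb])]
  rw [pvRep_runBlock 'S' pvVS K pvVb _ (by decide) (by simp [pvVb]) (by simp [pvVb]) (by simp [pvVb])]
  rw [pvRep_runBlock 'f' pvVf K pvVb _ (by decide) (by simp [pvVb]) (by simp [pvVb]) (by simp [pvVb])]


theorem pvRARun_Bu (K : Nat) (t : List Char) :
    pvRepAll (List.replicate K '%' ++ '%' :: 'B' :: t) =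
      List.replicate K '%' ++ (pvVB ++ pvRepAll t) := by
  simp only [pvRepAll]
  rw [pvRep_runPct 'Y' pvVY K _ (by decide) (by simp), pvRep_cons 'Y' pvVY 'B' _ (by decide)]
  rw [pvRep_runPct 'y' pvVy K _ (by decide) (by simp), pvRep_cons 'y' pvVy 'B' _ (by decide)]
  rw [pvRep_runPct 'm' pvVm K _ (by decide) (by simp), pvRep_cons 'm' pvVm 'B' _ (by decide)]
  rw [pvRep_runPct 'b' pvVb K _ (by decide) (by simp), pvRep_cons 'b' pvVb 'B' _ (by decide)]
  rw [pvRep_runMatch 'B' pvVB K _ (by decide)]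
  rw [pvRep_runBlock 'd' pvVd K pvVB _ (by decide) (by simp [pvVB]) (by simp [pvVB]) (by simp [pvVB])]
  rw [pvRep_runBlock 'H' pvVH K pvVB _ (by decide) (by simp [pvVB]) (by simp [pvVB]) (by simp [pvVB])]
  rw [pvRep_runBlock 'M' pvVM K pvVB _ (by decide) (by simp [pvVB]) (by simp [pvVB]) (by simp [pvVB])]
  rw [pvRep_runBlock 'S' pvVS K pvVB _ (by decide) (by simp [pvVB]) (by simp [pvVB]) (by simp [pvVB])]
  rw [pvRep_runBlock 'f' pvVf K pvVB _ (by decide) (by simp [pvVB]) (by simp [pvVB]) (by simp [pvVB])]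


theorem pvRARun_d (K : Nat) (t : List Char) :
    pvRepAll (List.replicate K '%' ++ '%' :: 'd' :: t) =
      List.replicate K '%' ++ (pvVd ++ pvRepAll t) := by
  simp only [pvRepAll]
  rw [pvRep_runPct 'Y' pvVY K _ (by decide) (by simp), pvRep_cons 'Y' pvVY 'd' _ (by decide)]
  rw [pvRep_runPct 'y' pvVy K _ (by decide) (by simp), pvRep_cons 'y' pvVy 'd' _ (by decide)]
  rw [pvRep_runPct 'm' pvVm K _ (by decide) (by simp), pvRep_cons 'm' pvVm 'd' _ (by decide)]
  rw [pvRep_runPct 'b' pvVb K _ (by decide) (by simp), pvRep_cons 'b' pvVb 'd' _ (by decide)]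
  rw [pvRep_runPct 'B' pvVB K _ (by decide) (by simp), pvRep_cons 'B' pvVB 'd' _ (by decide)]
  rw [pvRep_runMatch 'd' pvVd K _ (by decide)]
  rw [pvRep_runBlock 'H' pvVH K pvVd _ (by decide) (by simp [pvVd]) (by simp [pvVd]) (by simp [pvVd])]
  rw [pvRep_runBlock 'M' pvVM K pvVd _ (by decide) (by simp [pvVd]) (by simp [pvVd]) (by simp [pvVd])]
  rw [pvRep_runBlock 'S' pvVS K pvVd _ (by decide) (by simp [pvVd]) (by simp [pvVd]) (by simp [pvVd])]
  rw [pvRep_runBlock 'f' pvVf K pvVd _ (by decide) (by simp [pvVd]) (by simp [pvVd]) (by simp [pvVd])]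


theorem pvRARun_Hu (K : Nat) (t : List Char) :
    pvRepAll (List.replicate K '%' ++ '%' :: 'H' :: t) =
      List.replicate K '%' ++ (pvVH ++ pvRepAll t) := by
  simp only [pvRepAll]
  rw [pvRep_runPct 'Y' pvVY K _ (by decide) (by simp), pvRep_cons 'Y' pvVY 'H' _ (by decide)]
  rw [pvRep_runPct 'y' pvVy K _ (by decide) (by simp), pvRep_cons 'y' pvVy 'H' _ (by decide)]
  rw [pvRep_runPct 'm' pvVm K _ (by decide) (by simp), pvRep_cons 'm' pvVm 'H' _ (by decide)]
  rw [pvRep_runPct 'b' pvVb K _ (by decide) (by simp), pvRep_cons 'b' pvVb 'H' _ (by decide)]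
  rw [pvRep_runPct 'B' pvVB K _ (by decide) (by simp), pvRep_cons 'B' pvVB 'H' _ (by decide)]
  rw [pvRep_runPct 'd' pvVd K _ (by decide) (by simp), pvRep_cons 'd' pvVd 'H' _ (by decide)]
  rw [pvRep_runMatch 'H' pvVH K _ (by decide)]
  rw [pvRep_runBlock 'M' pvVM K pvVH _ (by decide) (by simp [pvVH]) (by simp [pvVH]) (by simp [pvVH])]
  rw [pvRep_runBlock 'S' pvVS K pvVH _ (by decide) (by simp [pvVH]) (by simp [pvVH]) (by simp [pvVH])]
  rw [pvRep_runBlock 'f' pvVf K pvVH _ (by decide) (by simp [pvVH]) (by simp [pvVH]) (by simp [pvVH])]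


theorem pvRARun_Mu (K : Nat) (t : List Char) :
    pvRepAll (List.replicate K '%' ++ '%' :: 'M' :: t) =
      List.replicate K '%' ++ (pvVM ++ pvRepAll t) := by
  simp only [pvRepAll]
  rw [pvRep_runPct 'Y' pvVY K _ (by decide) (by simp), pvRep_cons 'Y' pvVY 'M' _ (by decide)]
  rw [pvRep_runPct 'y' pvVy K _ (by decide) (by simp), pvRep_cons 'y' pvVy 'M' _ (by decide)]
  rw [pvRep_runPct 'm' pvVm K _ (by decide) (by simp), pvRep_cons 'm' pvVm 'M' _ (by decide)]
  rw [pvRep_runPct 'b' pvVb K _ (by decide) (by simp), pvRep_cons 'b' pvVb 'M' _ (by decide)]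
  rw [pvRep_runPct 'B' pvVB K _ (by decide) (by simp), pvRep_cons 'B' pvVB 'M' _ (by decide)]
  rw [pvRep_runPct 'd' pvVd K _ (by decide) (by simp), pvRep_cons 'd' pvVd 'M' _ (by decide)]
  rw [pvRep_runPct 'H' pvVH K _ (by decide) (by simp), pvRep_cons 'H' pvVH 'M' _ (by decide)]
  rw [pvRep_runMatch 'M' pvVM K _ (by decide)]
  rw [pvRep_runBlock 'S' pvVS K pvVM _ (by decide) (by simp [pvVM]) (by simp [pvVM]) (by simp [pvVM])]
  rw [pvRep_runBlock 'f' pvVf K pvVM _ (by decide) (by simp [pvVM]) (by simp [pvVM]) (by simp [pvVM])]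


theorem pvRARun_Su (K : Nat) (t : List Char) :
    pvRepAll (List.replicate K '%' ++ '%' :: 'S' :: t) =
      List.replicate K '%' ++ (pvVS ++ pvRepAll t) := by
  simp only [pvRepAll]
  rw [pvRep_runPct 'Y' pvVY K _ (by decide) (by simp), pvRep_cons 'Y' pvVY 'S' _ (by decide)]
  rw [pvRep_runPct 'y' pvVy K _ (by decide) (by simp), pvRep_cons 'y' pvVy 'S' _ (by decide)]
  rw [pvRep_runPct 'm' pvVm K _ (by decide) (by simp), pvRep_cons 'm' pvVm 'S' _ (by decide)]
  rw [pvRep_runPct 'b' pvVb K _ (by decide) (by simp), pvRep_cons 'b' pvVb 'S' _ (by decide)]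
  rw [pvRep_runPct 'B' pvVB K _ (by decide) (by simp), pvRep_cons 'B' pvVB 'S' _ (by decide)]
  rw [pvRep_runPct 'd' pvVd K _ (by decide) (by simp), pvRep_cons 'd' pvVd 'S' _ (by decide)]
  rw [pvRep_runPct 'H' pvVH K _ (by decide) (by simp), pvRep_cons 'H' pvVH 'S' _ (by decide)]
  rw [pvRep_runPct 'M' pvVM K _ (by decide) (by simp), pvRep_cons 'M' pvVM 'S' _ (by decide)]
  rw [pvRep_runMatch 'S' pvVS K _ (by decide)]
  rw [pvRep_runBlock 'f' pvVf K pvVS _ (by decide) (by simp [pvVS]) (by simp [pvVS]) (by simp [pvVS])]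


theorem pvRARun_f (K : Nat) (t : List Char) :
    pvRepAll (List.replicate K '%' ++ '%' :: 'f' :: t) =
      List.replicate K '%' ++ (pvVf ++ pvRepAll t) := by
  simp only [pvRepAll]
  rw [pvRep_runPct 'Y' pvVY K _ (by decide) (by simp), pvRep_cons 'Y' pvVY 'f' _ (by decide)]
  rw [pvRep_runPct 'y' pvVy K _ (by decide) (by simp), pvRep_cons 'y' pvVy 'f' _ (by decide)]
  rw [pvRep_runPct 'm' pvVm K _ (by decide) (by simp), pvRep_cons 'm' pvVm 'f' _ (by decide)]
  rw [pvRep_runPct 'b' pvVb K _ (by decide) (by simp), pvRep_cons 'b' pvVb 'f' _ (by decide)]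
  rw [pvRep_runPct 'B' pvVB K _ (by decide) (by simp), pvRep_cons 'B' pvVB 'f' _ (by decide)]
  rw [pvRep_runPct 'd' pvVd K _ (by decide) (by simp), pvRep_cons 'd' pvVd 'f' _ (by decide)]
  rw [pvRep_runPct 'H' pvVH K _ (by decide) (by simp), pvRep_cons 'H' pvVH 'f' _ (by decide)]
  rw [pvRep_runPct 'M' pvVM K _ (by decide) (by simp), pvRep_cons 'M' pvVM 'f' _ (by decide)]
  rw [pvRep_runPct 'S' pvVS K _ (by decide) (by simp), pvRep_cons 'S' pvVS 'f' _ (by decide)]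
  rw [pvRep_runMatch 'f' pvVf K _ (by decide)]


theorem pvRARunNon (K : Nat) (c : Char) (t : List Char)
    (hc : c ∉ ['Y','y','m','b','B','d','H','M','S','f']) (hp : c ≠ '%') :
    pvRepAll (List.replicate K '%' ++ '%' :: c :: t) =
      List.replicate K '%' ++ '%' :: c :: pvRepAll t := by
  have hYu : c ≠ 'Y' := fun h => hc (by subst h; decide)
  have hy : c ≠ 'y' := fun h => hc (by subst h; decide)
  have hm : c ≠ 'm' := fun h => hc (by subst h; decide)
  have hb : c ≠ 'b' := fun h => hc (by subst h; decide)
  have hBu : c ≠ 'B' := fun h => hc (by subst h; decide)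
  have hd : c ≠ 'd' := fun h => hc (by subst h; decide)
  have hHu : c ≠ 'H' := fun h => hc (by subst h; decide)
  have hMu : c ≠ 'M' := fun h => hc (by subst h; decide)
  have hSu : c ≠ 'S' := fun h => hc (by subst h; decide)
  have hf : c ≠ 'f' := fun h => hc (by subst h; decide)
  simp only [pvRepAll]
  rw [pvRep_runPct 'Y' pvVY K _ (by decide) (by simp [hYu]), pvRep_cons 'Y' pvVY c _ hp]
  rw [pvRep_runPct 'y' pvVy K _ (by decide) (by simp [hy]), pvRep_cons 'y' pvVy c _ hp]
  rw [pvRep_runPct 'm' pvVm K _ (by decide) (by simp [hm]), pvRep_cons 'm' pvVm c _ hp]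
  rw [pvRep_runPct 'b' pvVb K _ (by decide) (by simp [hb]), pvRep_cons 'b' pvVb c _ hp]
  rw [pvRep_runPct 'B' pvVB K _ (by decide) (by simp [hBu]), pvRep_cons 'B' pvVB c _ hp]
  rw [pvRep_runPct 'd' pvVd K _ (by decide) (by simp [hd]), pvRep_cons 'd' pvVd c _ hp]
  rw [pvRep_runPct 'H' pvVH K _ (by decide) (by simp [hHu]), pvRep_cons 'H' pvVH c _ hp]
  rw [pvRep_runPct 'M' pvVM K _ (by decide) (by simp [hMu]), pvRep_cons 'M' pvVM c _ hp]
  rw [pvRep_runPct 'S' pvVS K _ (by decide) (by simp [hSu]), pvRep_cons 'S' pvVS c _ hp]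
  rw [pvRep_runPct 'f' pvVf K _ (by decide) (by simp [hf]), pvRep_cons 'f' pvVf c _ hp]


theorem pvSB_Yu (t : List Char) : pvScanB ('%' :: 'Y' :: t) = pvVY ++ pvScanB t := by
  have h : PySem.Dict.get? pvMappingB (String.ofList ['%', 'Y']) = some "YYYY" := by decide
  have h2 : ("YYYY" : String).toList = pvVY := by decide
  simp [pvScanB, h, h2]

theorem pvSB_y (t : List Char) : pvScanB ('%' :: 'y' :: t) = pvVy ++ pvScanB t := by
  have h : PySem.Dict.get? pvMappingB (String.ofList ['%', 'y']) = some "YY" := by decide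
  have h2 : ("YY" : String).toList = pvVy := by decide
  simp [pvScanB, h, h2]

theorem pvSB_m (t : List Char) : pvScanB ('%' :: 'm' :: t) = pvVm ++ pvScanB t := by
  have h : PySem.Dict.get? pvMappingB (String.ofList ['%', 'm']) = some "MM" := by decide
  have h2 : ("MM" : String).toList = pvVm := by decide
  simp [pvScanB, h, h2]

theorem pvSB_b (t : List Char) : pvScanB ('%' :: 'b' :: t) = pvVb ++ pvScanB t := by
  have h : PySem.Dict.get? pvMappingB (String.ofList ['%', 'b']) = some "[Jan through Dec]" := by decide
  have h2 : ("[Jan through Dec]" : String).toList = pvVb := by decide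
  simp [pvScanB, h, h2]

theorem pvSB_Bu (t : List Char) : pvScanB ('%' :: 'B' :: t) = pvVB ++ pvScanB t := by
  have h : PySem.Dict.get? pvMappingB (String.ofList ['%', 'B']) = some "[January through December]" := by decide
  have h2 : ("[January through December]" : String).toList = pvVB := by decide
  simp [pvScanB, h, h2]

theorem pvSB_d (t : List Char) : pvScanB ('%' :: 'd' :: t) = pvVd ++ pvScanB t := by
  have h : PySem.Dict.get? pvMappingB (String.ofList ['%', 'd']) = some "DD" := by decide
  have h2 : ("DD" : String).toList = pvVd := by decide
  simp [pvScanB, h, h2]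

theorem pvSB_Hu (t : List Char) : pvScanB ('%' :: 'H' :: t) = pvVH ++ pvScanB t := by
  have h : PySem.Dict.get? pvMappingB (String.ofList ['%', 'H']) = some "HH" := by decide
  have h2 : ("HH" : String).toList = pvVH := by decide
  simp [pvScanB, h, h2]

theorem pvSB_Mu (t : List Char) : pvScanB ('%' :: 'M' :: t) = pvVM ++ pvScanB t := by
  have h : PySem.Dict.get? pvMappingB (String.ofList ['%', 'M']) = some "MM" := by decide
  have h2 : ("MM" : String).toList = pvVM := by decide
  simp [pvScanB, h, h2]

theorem pvSB_Su (t : List Char) : pvScanB ('%' :: 'S' :: t) = pvVS ++ pvScanB t := by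
  have h : PySem.Dict.get? pvMappingB (String.ofList ['%', 'S']) = some "SS" := by decide
  have h2 : ("SS" : String).toList = pvVS := by decide
  simp [pvScanB, h, h2]

theorem pvSB_f (t : List Char) : pvScanB ('%' :: 'f' :: t) = pvVf ++ pvScanB t := by
  have h : PySem.Dict.get? pvMappingB (String.ofList ['%', 'f']) = some "uuuuuu" := by decide
  have h2 : ("uuuuuu" : String).toList = pvVf := by decide
  simp [pvScanB, h, h2]

theorem pvMain : ∀ n l, l.length ≤ n → ¬ (['%', '%', 'm'] <:+: l) → pvRepAll l = pvScanB l := by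
  intro n
  induction n with
  | zero =>
    intro l hlen _
    have : l = [] := List.eq_nil_of_length_eq_zero (Nat.le_zero.mp hlen)
    subst this
    rfl
  | succ n ih =>
    intro l hlen hinf
    obtain ⟨k, rest, hl, hr⟩ := pvDecomp l
    subst hl
    cases k with
    | zero =>
      simp only [List.replicate, List.nil_append] at hlen hinf hr ⊢
      cases rest with
      | nil => rfl
      | cons c t =>
        have hc : c ≠ '%' := by simpa using hr
        have iht : pvRepAll t = pvScanB t := by
          refine ih t (by simp at hlen; omega) (pvInfMono ⟨[c], rfl⟩ hinf)
        rw [pvRAll_cons c t hc, pvScanB_cons c t hc, iht]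
    | succ k =>
      rw [show List.replicate (k + 1) '%' ++ rest = List.replicate k '%' ++ '%' :: rest from by
        simp [List.replicate_succ, pvShift]] at hlen hinf ⊢
      cases rest with
      | nil =>
        rw [pvRAll_run_pure k, pvScanB_run k []]
        rfl
      | cons c t =>
        have hc : c ≠ '%' := by simpa using hr
        have iht : pvRepAll t = pvScanB t := by
          refine ih t ?_ (pvInfMono ⟨List.replicate k '%' ++ ['%', c], by simp⟩ hinf)
          simp at hlen
          omega
        by_cases hm : c = 'm'
        · subst hm
          cases k with
          | zero =>
            simp only [List.replicate, List.nil_append]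
            rw [pvRA_m t, pvSB_m t, iht]
          | succ k2 =>
            exfalso
            apply hinf
            refine ⟨List.replicate k2 '%', t, ?_⟩
            rw [show List.replicate (k2 + 1) '%' ++ '%' :: 'm' :: t
                  = List.replicate k2 '%' ++ '%' :: '%' :: 'm' :: t from by
              simp [List.replicate_succ, pvShift]]
            simp
        by_cases hYu : c = 'Y'
        · subst hYu
          rw [pvRARun_Yu k t, pvScanB_run k ('Y' :: t), pvSB_Yu t, iht]
        ·
          by_cases hy : c = 'y'
          · subst hy
            rw [pvRARun_y k t, pvScanB_run k ('y' :: t), pvSB_y t, iht]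
          ·
            by_cases hb : c = 'b'
            · subst hb
              rw [pvRARun_b k t, pvScanB_run k ('b' :: t), pvSB_b t, iht]
            ·
              by_cases hBu : c = 'B'
              · subst hBu
                rw [pvRARun_Bu k t, pvScanB_run k ('B' :: t), pvSB_Bu t, iht]
              ·
                by_cases hd : c = 'd'
                · subst hd
                  rw [pvRARun_d k t, pvScanB_run k ('d' :: t), pvSB_d t, iht]
                ·
                  by_cases hHu : c = 'H'
                  · subst hHu
                    rw [pvRARun_Hu k t, pvScanB_run k ('H' :: t), pvSB_Hu t, iht]
                  ·
                    by_cases hMu : c = 'M'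
                    · subst hMu
                      rw [pvRARun_Mu k t, pvScanB_run k ('M' :: t), pvSB_Mu t, iht]
                    ·
                      by_cases hSu : c = 'S'
                      · subst hSu
                        rw [pvRARun_Su k t, pvScanB_run k ('S' :: t), pvSB_Su t, iht]
                      ·
                        by_cases hf : c = 'f'
                        · subst hf
                          rw [pvRARun_f k t, pvScanB_run k ('f' :: t), pvSB_f t, iht]
                        ·
                          have hnc : c ∉ ['Y','y','m','b','B','d','H','M','S','f'] := by
                            simp [hYu, hy, hm, hb, hBu, hd, hHu, hMu, hSu, hf]
                          rw [pvRARunNon k c t hnc hc, pvScanB_run k (c :: t),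
                              show pvScanB ('%' :: c :: t) = '%' :: c :: pvScanB t from by
                                rw [show pvScanB ('%' :: c :: t) = '%' :: pvScanB (c :: t) from by
                                      simp [pvScanB, pvLk_noncode c hnc],
                                    pvScanB_cons c t hc],
                              iht]


-- ===== the intended difference is exact: A ≠ B everywhere inside D_ =====

theorem pvM3_eq (X : List Char) : pvVM ++ 'M' :: X = ['M','M','M'] ++ X := by simp [pvVM]

theorem pvReshape1 (k : Nat) (X : List Char) :
    List.replicate (k+1) '%' ++ (pvVm ++ X) = List.replicate k '%' ++ '%'::'M'::'M'::X := by
  simp [pvVm, List.replicate_succ', List.append_assoc]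

-- A's value on a run of at least two '%' followed by "m": the %m pass and the %M pass cascade
theorem pvRACascade (k : Nat) (t : List Char) :
    pvRepAll (List.replicate (k+1) '%' ++ '%'::'m'::t) =
      List.replicate k '%' ++ 'M'::'M'::'M'::pvRepAll t := by
  simp only [pvRepAll]
  rw [pvRep_runPct 'Y' pvVY (k+1) _ (by decide) (by simp), pvRep_cons 'Y' pvVY 'm' _ (by decide)]
  rw [pvRep_runPct 'y' pvVy (k+1) _ (by decide) (by simp), pvRep_cons 'y' pvVy 'm' _ (by decide)]
  rw [pvRep_runMatch 'm' pvVm (k+1) _ (by decide)]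
  rw [pvRep_runBlock 'b' pvVb (k+1) pvVm _ (by decide) (by simp [pvVm]) (by simp [pvVm]) (by simp [pvVm])]
  rw [pvRep_runBlock 'B' pvVB (k+1) pvVm _ (by decide) (by simp [pvVm]) (by simp [pvVm]) (by simp [pvVm])]
  rw [pvRep_runBlock 'd' pvVd (k+1) pvVm _ (by decide) (by simp [pvVm]) (by simp [pvVm]) (by simp [pvVm])]
  rw [pvRep_runBlock 'H' pvVH (k+1) pvVm _ (by decide) (by simp [pvVm]) (by simp [pvVm]) (by simp [pvVm])]
  rw [pvReshape1 k _]
  rw [pvRep_runMatch 'M' pvVM k _ (by decide)]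
  rw [pvRep_cons 'M' pvVM 'M' _ (by decide)]
  rw [pvM3_eq]
  rw [pvRep_runBlock 'S' pvVS k ['M','M','M'] _ (by decide) (by simp) (by simp) (by simp)]
  rw [pvRep_runBlock 'f' pvVf k ['M','M','M'] _ (by decide) (by simp) (by simp) (by simp)]
  simp

-- B's value on the same inputs: the single scan keeps the extra '%' literally
theorem pvSBCascade (k : Nat) (t : List Char) :
    pvScanB (List.replicate (k+1) '%' ++ '%'::'m'::t) =
      List.replicate (k+1) '%' ++ ('M'::'M'::pvScanB t) := by
  rw [pvScanB_run (k+1) ('m'::t), pvSB_m t]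
  simp [pvVm]

theorem pvCascadeNe (k : Nat) (X Y : List Char) :
    List.replicate k '%' ++ 'M'::'M'::'M'::X ≠ List.replicate (k+1) '%' ++ ('M'::'M'::Y) := by
  intro h
  have h2 := congrArg (fun L => L[k]?) h
  simp [List.getElem?_append_left] at h2

theorem pvInfNil (u : List Char) : ¬ (['%','%','m'] <:+: ([] : List Char)) := by
  intro h
  exact absurd (List.eq_nil_of_infix_nil h) (by decide)

theorem pvInfDropCons (c : Char) (t : List Char) (hc : c ≠ '%')
    (h : ['%','%','m'] <:+: (c :: t)) : ['%','%','m'] <:+: t := by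
  obtain ⟨s, u, e⟩ := h
  cases s with
  | nil => simp at e; exact absurd e.1.symm hc
  | cons x s' =>
    simp only [List.cons_append, List.cons.injEq] at e
    exact ⟨s', u, e.2⟩

theorem pvInfDropM0 (t : List Char)
    (h : ['%','%','m'] <:+: ('%' :: 'm' :: t)) : ['%','%','m'] <:+: t := by
  obtain ⟨s, u, e⟩ := h
  cases s with
  | nil => simp at e
  | cons x s' =>
    simp only [List.cons_append, List.cons.injEq] at e
    cases s' with
    | nil => simp at e
    | cons y s'' =>
      simp only [List.cons_append, List.cons.injEq] at e
      exact ⟨s'', u, e.2.2⟩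

theorem pvInfRunDrop : ∀ (k : Nat) (c : Char) (t : List Char), c ≠ '%' → c ≠ 'm' →
    (['%','%','m'] <:+: (List.replicate k '%' ++ '%' :: c :: t)) → ['%','%','m'] <:+: t := by
  intro k
  induction k with
  | zero =>
    intro c t hc hm h
    simp only [List.replicate, List.nil_append] at h
    obtain ⟨s, u, e⟩ := h
    cases s with
    | nil => simp at e; exact absurd e.1.symm hc
    | cons x s' =>
      simp only [List.cons_append, List.cons.injEq] at e
      exact pvInfDropCons c t hc ⟨s', u, e.2⟩
  | succ n ih =>
    intro c t hc hm h
    rw [List.replicate_succ, List.cons_append] at h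
    obtain ⟨s, u, e⟩ := h
    cases s with
    | nil =>
      exfalso
      simp only [List.nil_append, List.cons_append, List.cons.injEq, true_and] at e
      cases n with
      | zero => simp at e; exact hm e.1.symm
      | succ n2 =>
        rw [List.replicate_succ, List.cons_append] at e
        simp only [List.cons.injEq, true_and] at e
        have := congrArg List.head? e
        rw [pvHead_run] at this
        simp at this
    | cons x s' =>
      simp only [List.cons_append, List.cons.injEq] at e
      exact ih c t hc hm ⟨s', u, e.2⟩

theorem pvInfRunPure (k : Nat) (h : ['%','%','m'] <:+: List.replicate k '%') : False := by
  have hm : 'm' ∈ List.replicate k '%' := h.subset (by decide)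
  exact absurd (List.eq_of_mem_replicate hm) (by decide)

theorem pvTightMain : ∀ n l, l.length ≤ n → (['%','%','m'] <:+: l) → pvRepAll l ≠ pvScanB l := by
  intro n
  induction n with
  | zero =>
    intro l hlen hinf
    have : l = [] := List.eq_nil_of_length_eq_zero (Nat.le_zero.mp hlen)
    subst this
    exact absurd hinf (pvInfNil [])
  | succ n ih =>
    intro l hlen hinf
    obtain ⟨k, rest, hl, hr⟩ := pvDecomp l
    subst hl
    cases k with
    | zero =>
      simp only [List.replicate, List.nil_append] at hlen hinf hr ⊢
      cases rest with
      | nil => exact absurd hinf (pvInfNil [])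
      | cons c t =>
        have hc : c ≠ '%' := by simpa using hr
        have hin : ['%','%','m'] <:+: t := pvInfDropCons c t hc hinf
        rw [pvRAll_cons c t hc, pvScanB_cons c t hc]
        intro h
        exact ih t (by simp at hlen; omega) hin (by simpa using h)
    | succ k =>
      rw [show List.replicate (k + 1) '%' ++ rest = List.replicate k '%' ++ '%' :: rest from by
        simp [List.replicate_succ, pvShift]] at hlen hinf ⊢
      cases rest with
      | nil =>
        exfalso
        apply pvInfRunPure (k+1)
        rw [show List.replicate (k+1) '%' = List.replicate k '%' ++ '%' :: [] from by
          simp [List.replicate_succ']]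
        exact hinf
      | cons c t =>
        have hc : c ≠ '%' := by simpa using hr
        have hlt : t.length ≤ n := by simp at hlen; omega
        by_cases hm : c = 'm'
        · subst hm
          cases k with
          | zero =>
            simp only [List.replicate, List.nil_append] at hinf ⊢
            have hin : ['%','%','m'] <:+: t := pvInfDropM0 t hinf
            rw [pvRA_m t, pvSB_m t]
            intro h
            exact ih t hlt hin (List.append_cancel_left h)
          | succ k2 =>
            rw [show List.replicate (k2 + 1) '%' ++ '%' :: 'm' :: t
                  = List.replicate (k2 + 1) '%' ++ '%' :: 'm' :: t from rfl]
            rw [pvRACascade k2 t, pvSBCascade k2 t]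
            exact pvCascadeNe k2 _ _
        · by_cases hYux : c = 'Y'
          · subst hYux
            have hin : ['%','%','m'] <:+: t := pvInfRunDrop k 'Y' t (by decide) (by decide) hinf
            rw [pvRARun_Yu k t, pvScanB_run k ('Y' :: t), pvSB_Yu t]
            intro h
            exact ih t hlt hin (List.append_cancel_left (List.append_cancel_left h))
          ·
            by_cases hyx : c = 'y'
            · subst hyx
              have hin : ['%','%','m'] <:+: t := pvInfRunDrop k 'y' t (by decide) (by decide) hinf
              rw [pvRARun_y k t, pvScanB_run k ('y' :: t), pvSB_y t]
              intro h
              exact ih t hlt hin (List.append_cancel_left (List.append_cancel_left h))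
            ·
              by_cases hbx : c = 'b'
              · subst hbx
                have hin : ['%','%','m'] <:+: t := pvInfRunDrop k 'b' t (by decide) (by decide) hinf
                rw [pvRARun_b k t, pvScanB_run k ('b' :: t), pvSB_b t]
                intro h
                exact ih t hlt hin (List.append_cancel_left (List.append_cancel_left h))
              ·
                by_cases hBux : c = 'B'
                · subst hBux
                  have hin : ['%','%','m'] <:+: t := pvInfRunDrop k 'B' t (by decide) (by decide) hinf
                  rw [pvRARun_Bu k t, pvScanB_run k ('B' :: t), pvSB_Bu t]
                  intro h
                  exact ih t hlt hin (List.append_cancel_left (List.append_cancel_left h))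
                ·
                  by_cases hdx : c = 'd'
                  · subst hdx
                    have hin : ['%','%','m'] <:+: t := pvInfRunDrop k 'd' t (by decide) (by decide) hinf
                    rw [pvRARun_d k t, pvScanB_run k ('d' :: t), pvSB_d t]
                    intro h
                    exact ih t hlt hin (List.append_cancel_left (List.append_cancel_left h))
                  ·
                    by_cases hHux : c = 'H'
                    · subst hHux
                      have hin : ['%','%','m'] <:+: t := pvInfRunDrop k 'H' t (by decide) (by decide) hinf
                      rw [pvRARun_Hu k t, pvScanB_run k ('H' :: t), pvSB_Hu t]
                      intro h
                      exact ih t hlt hin (List.append_cancel_left (List.append_cancel_left h))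
                    ·
                      by_cases hMux : c = 'M'
                      · subst hMux
                        have hin : ['%','%','m'] <:+: t := pvInfRunDrop k 'M' t (by decide) (by decide) hinf
                        rw [pvRARun_Mu k t, pvScanB_run k ('M' :: t), pvSB_Mu t]
                        intro h
                        exact ih t hlt hin (List.append_cancel_left (List.append_cancel_left h))
                      ·
                        by_cases hSux : c = 'S'
                        · subst hSux
                          have hin : ['%','%','m'] <:+: t := pvInfRunDrop k 'S' t (by decide) (by decide) hinf
                          rw [pvRARun_Su k t, pvScanB_run k ('S' :: t), pvSB_Su t]
                          intro h
                          exact ih t hlt hin (List.append_cancel_left (List.append_cancel_left h))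
                        ·
                          by_cases hfx : c = 'f'
                          · subst hfx
                            have hin : ['%','%','m'] <:+: t := pvInfRunDrop k 'f' t (by decide) (by decide) hinf
                            rw [pvRARun_f k t, pvScanB_run k ('f' :: t), pvSB_f t]
                            intro h
                            exact ih t hlt hin (List.append_cancel_left (List.append_cancel_left h))
                          ·
                            have hncx : c ∉ ['Y','y','m','b','B','d','H','M','S','f'] := by
                              simp [hYux, hyx, hm, hbx, hBux, hdx, hHux, hMux, hSux, hfx]
                            have hin : ['%','%','m'] <:+: t := pvInfRunDrop k c t hc hm hinf
                            rw [pvRARunNon k c t hncx hc, pvScanB_run k (c :: t),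
                                show pvScanB ('%' :: c :: t) = '%' :: c :: pvScanB t from by
                                  rw [show pvScanB ('%' :: c :: t) = '%' :: pvScanB (c :: t) from by
                                        simp [pvScanB, pvLk_noncode c hncx],
                                      pvScanB_cons c t hc]]
                            intro h
                            have h2 := List.append_cancel_left h
                            simp only [List.cons.injEq] at h2
                            exact ih t hlt hin h2.2.2

-- ===== VERDICT (by name: the statement is the Claim_ definition above) =====
theorem get_readable_date_format_spec : Claim_unchanged_get_readable_date_format := by
  intro s _ hD
  have hinf : ¬ (['%', '%', 'm'] <:+: s.toList) := by
    rw [D_get_readable_date_format] at hD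
    intro h
    exact hD (by rw [PySem.Str.isIn_iff_infix]; exact h)
  rw [pvA_eq_repAll, pvB_eq_scan, pvMain s.toList.length s.toList (le_refl _) hinf]

theorem get_readable_date_format_changed : Claim_changed_get_readable_date_format := by
  unfold Claim_changed_get_readable_date_format; decide

theorem get_readable_date_format_tight : Claim_exact_get_readable_date_format := by
  intro s _ hD
  have hinf : (['%', '%', 'm'] <:+: s.toList) := by
    rw [D_get_readable_date_format, PySem.Str.isIn_iff_infix] at hD
    simpa using hD
  intro h
  have h2 := congrArg String.toList h
  rw [pvA_eq_repAll, pvB_eq_scan] at h2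
  simp only [String.toList_ofList] at h2
  exact pvTightMain s.toList.length s.toList (le_refl _) hinf h2
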